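-- pv_equiv track=rewrite | github.com/Thordata/thordata-python-sdk | scripts/acceptance/run_locations.py | _pick_country_code
-- ===== SOURCE A (Python) =====
-- def _pick_country_code(countries: list[dict]) -> str | None:
--     # Prefer US, but fall back to any valid 2-letter code
--     for item in countries:
--         code = str(item.get("code") or item.get("country_code") or "").strip()
--         if code.upper() == "US":
--             return "US"
--     for item in countries:
--         code = str(item.get("code") or item.get("country_code") or "").strip()
--         if len(code) == 2 and code.isalpha():
--             return code.upper()
--     return None
-- ===== SOURCE B (Python) =====
-- def _pick_country_code(countries: list[dict]) -> str | None:
--     # Single pass: return "US" immediately when seen; otherwise remember the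
--     # first valid 2-letter code as a fallback and keep scanning for US.
--     fallback = None
--     for item in countries:
--         code = str(item.get("code") or item.get("country_code") or "").strip()
--         if code.upper() == "US":
--             return "US"
--         if fallback is None and len(code) == 2 and code.isalpha():
--             fallback = code.upper()
--     return fallback
-- ===== Notes on version B (the rewrite author's own statement) =====
-- stated objective: simpler
-- what changed: Replaced A's two full scans of the list (one for US, one for a fallback) by a single pass that returns US immediately and carries the first valid fallback in an accumulator.
import Mathlib
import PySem

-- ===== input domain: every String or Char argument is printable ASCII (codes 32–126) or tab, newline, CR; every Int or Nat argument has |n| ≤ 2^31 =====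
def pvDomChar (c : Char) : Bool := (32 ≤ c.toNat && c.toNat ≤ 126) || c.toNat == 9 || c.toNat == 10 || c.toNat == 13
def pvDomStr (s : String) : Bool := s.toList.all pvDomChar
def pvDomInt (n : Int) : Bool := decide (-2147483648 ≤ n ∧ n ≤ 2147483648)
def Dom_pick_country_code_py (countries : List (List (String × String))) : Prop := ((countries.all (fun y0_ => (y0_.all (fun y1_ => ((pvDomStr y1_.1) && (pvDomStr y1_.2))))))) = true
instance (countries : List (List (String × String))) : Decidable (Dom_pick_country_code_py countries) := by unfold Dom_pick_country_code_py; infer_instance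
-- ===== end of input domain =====

-- B replaces A's two full scans by one pass carrying the first valid fallback; objective: simpler.

-- ===== PORT A =====
-- code = str(item.get("code") or item.get("country_code") or "").strip()  (shared by both Pythons, line for line)
def pvCode (item : List (String × String)) : String :=
  let a := ((PySem.Dict.mk item).get? "code").getD ""
  let b := if a ≠ "" then a else ((PySem.Dict.mk item).get? "country_code").getD ""
  PySem.Str.strip b

-- A's first loop: return "US" on the first US item
def pickLoop1 : List (List (String × String)) → Option String
  | [] => none
  | item :: rest =>
    if PySem.Str.upper (pvCode item) = "US" then some "US" else pickLoop1 rest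

-- A's second loop: return the first valid 2-letter code, uppercased
def pickLoop2 : List (List (String × String)) → Option String
  | [] => none
  | item :: rest =>
    let code := pvCode item
    if PySem.Str.len code = 2 && PySem.Str.strIsalpha code then some (PySem.Str.upper code)
    else pickLoop2 rest

def pick_country_code_py (countries : List (List (String × String))) : Option String :=
  match pickLoop1 countries with
  | some r => some r
  | none => pickLoop2 countries

-- ===== PORT B =====
-- single pass with a fallback accumulator (Source B's loop)
def pickGo : List (List (String × String)) → Option String → Option String
  | [], fallback => fallback
  | item :: rest, fallback =>
    let code := pvCode item
    if PySem.Str.upper code = "US" then some "US"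
    else pickGo rest
      (if fallback.isNone && (PySem.Str.len code = 2 && PySem.Str.strIsalpha code) then
        some (PySem.Str.upper code)
      else fallback)

def pick_country_code_py_alt (countries : List (List (String × String))) : Option String :=
  pickGo countries none

-- ===== PRECONDITION & SPEC =====
def Spec_pick_country_code_py (countries : List (List (String × String))) (out : Option String) : Prop := out = pick_country_code_py_alt countries
instance (countries : List (List (String × String))) (out : Option String) : Decidable (Spec_pick_country_code_py countries out) := by unfold Spec_pick_country_code_py; infer_instance

-- ===== CLAIM (what is proved, stated in full; the proofs are below) =====
def Claim_equal_pick_country_code_py : Prop := ∀ (countries : List (List (String × String))), Dom_pick_country_code_py countries → Spec_pick_country_code_py countries (pick_country_code_py countries)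

-- ===== LEMMAS AND PROOFS =====
theorem pickGo_eq (cs : List (List (String × String))) (fb : Option String) :
    pickGo cs fb = (pickLoop1 cs).or (fb.or (pickLoop2 cs)) := by
  induction cs generalizing fb with
  | nil => cases fb <;> rfl
  | cons item rest ih =>
    rw [pickGo, pickLoop1, pickLoop2]
    by_cases hus : PySem.Str.upper (pvCode item) = "US"
    · rw [if_pos hus, if_pos hus, Option.some_or]
    · rw [if_neg hus, if_neg hus, ih]
      cases fb with
      | some x =>
        simp only [Option.isNone_some, Bool.false_and, Bool.false_eq_true, if_false,
          Option.some_or]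
      | none =>
        simp only [Option.isNone_none, Bool.true_and, Option.none_or]
        by_cases hv : (PySem.Str.len (pvCode item) = 2 && PySem.Str.strIsalpha (pvCode item)) = true
        · rw [if_pos hv, if_pos hv, Option.some_or]
        · rw [if_neg hv, if_neg hv, Option.none_or]

-- ===== VERDICT (by name: the statement is the Claim_ definition above) =====
theorem pick_country_code_py_spec : Claim_equal_pick_country_code_py := by
  intro cs _
  unfold Spec_pick_country_code_py pick_country_code_py pick_country_code_py_alt
  rw [pickGo_eq]
  cases h : pickLoop1 cs <;> simp
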